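-- pv_equiv track=rewrite | github.com/sterance/relic-info-extractor | gui.py | find_common_words
-- ===== SOURCE A (Python) =====
-- def find_common_words(names):
--     """Find common words among names"""
--     if not names:
--         return ""
--
--     # Split each name into words
--     word_lists = [name.split() for name in names]
--
--     if not word_lists or not word_lists[0]:
--         return ""
--
--     # Find common words at the beginning
--     common_words = []
--     min_words = min(len(words) for words in word_lists)
--
--     for i in range(min_words):
--         word = word_lists[0][i]
--         if all(words[i] == word for words in word_lists):
--             common_words.append(word)
--         else:
--             break
--
--     if common_words:
--         return ' '.join(common_words)
--
--     return ""
-- ===== SOURCE B (Python) =====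
-- def _lcp(xs, ys):
--     if xs and ys and xs[0] == ys[0]:
--         return [xs[0]] + _lcp(xs[1:], ys[1:])
--     return []
--
--
-- def find_common_words(names):
--     """Find common words among names"""
--     if not names:
--         return ""
--     prefix = names[0].split()
--     for name in names[1:]:
--         prefix = _lcp(prefix, name.split())
--         if not prefix:
--             break
--     return ' '.join(prefix)
-- ===== Notes on version B (the rewrite author's own statement) =====
-- stated objective: simpler
-- what changed: Instead of A's columnar scan (splitting all names up front, taking the min word count, and testing column i across every word list with an inner all()), B folds over the names once, maintaining a running common prefix that is truncated against each name's words and abandoned early once it is empty.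
import Mathlib
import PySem

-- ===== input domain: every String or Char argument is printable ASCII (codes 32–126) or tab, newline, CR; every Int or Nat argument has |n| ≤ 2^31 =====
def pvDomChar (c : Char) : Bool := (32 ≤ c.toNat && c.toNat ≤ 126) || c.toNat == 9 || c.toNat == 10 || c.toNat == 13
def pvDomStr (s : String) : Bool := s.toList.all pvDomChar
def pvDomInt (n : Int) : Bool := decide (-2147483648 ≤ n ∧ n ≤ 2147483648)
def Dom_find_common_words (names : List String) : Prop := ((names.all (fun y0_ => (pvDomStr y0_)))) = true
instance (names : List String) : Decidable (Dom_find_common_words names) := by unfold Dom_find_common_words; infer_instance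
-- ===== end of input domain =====

-- B replaces A's columnar scan (min word count + per-column all()) by a single fold that
-- truncates a running common prefix against each name's words; objective: simpler.

-- ===== PORT A =====
-- min(len(words) for words in word_lists)
def pvMinWords (wls : List (List String)) : Nat :=
  ((wls.map List.length).min?).getD 0

-- the 'for i in range(min_words): … else break' loop collecting common_words from index i on
def pvCollect (wls : List (List String)) (minw : Nat) (i : Nat) : List String :=
  if h : i < minw then
    let w := (wls.headD []).getD i ""
    if wls.all (fun ws => ws.getD i "" == w) then
      w :: pvCollect wls minw (i + 1)
    else []
  else []
termination_by minw - i

def find_common_words (names : List String) : String :=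
  if names = [] then ""
  else
    let word_lists := names.map PySem.Str.split₀
    if word_lists = [] ∨ word_lists.headD [] = [] then ""
    else
      let common := pvCollect word_lists (pvMinWords word_lists) 0
      if common ≠ [] then PySem.Str.join " " common else ""

-- ===== PORT B =====
-- _lcp(xs, ys): common prefix of two word lists
def pvLcp : List String → List String → List String
  | x :: xs, y :: ys => if x = y then x :: pvLcp xs ys else []
  | _, _ => []

-- the 'for name in names[1:]' loop with early break when the prefix is empty
def pvFold (p : List String) : List String → List String
  | [] => p
  | n :: rest =>
    let p' := pvLcp p (PySem.Str.split₀ n)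
    if p' = [] then p' else pvFold p' rest

def find_common_words_alt (names : List String) : String :=
  match names with
  | [] => ""
  | n :: rest => PySem.Str.join " " (pvFold (PySem.Str.split₀ n) rest)

-- ===== PRECONDITION & SPEC =====
def Spec_find_common_words (names : List String) (out : String) : Prop := out = find_common_words_alt names
instance (names : List String) (out : String) : Decidable (Spec_find_common_words names out) := by unfold Spec_find_common_words; infer_instance

-- ===== CLAIM (what is proved, stated in full; the proofs are below) =====
def Claim_equal_find_common_words : Prop := ∀ (names : List String), Dom_find_common_words names → Spec_find_common_words names (find_common_words names)

-- ===== LEMMAS AND PROOFS =====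

-- length of the common prefix of two word lists
def cpl (a b : List String) : Nat := (pvLcp a b).length

lemma lcp_eq_take (a b : List String) : pvLcp a b = a.take (cpl a b) := by
  induction a generalizing b with
  | nil => simp [cpl, pvLcp]
  | cons x xs ih =>
    cases b with
    | nil => simp [cpl, pvLcp]
    | cons y ys =>
      by_cases h : x = y <;> simp [cpl, pvLcp, h]
      exact ih ys

lemma lcp_take_left (a b : List String) (m : Nat) :
    pvLcp (a.take m) b = (pvLcp a b).take m := by
  induction a generalizing b m with
  | nil => simp [pvLcp]
  | cons x xs ih =>
    cases m with
    | zero => simp [pvLcp]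
    | succ m =>
      cases b with
      | nil => simp [pvLcp]
      | cons y ys =>
        by_cases h : x = y <;> simp [pvLcp, h]
        exact ih ys m

lemma cpl_lt_iff (a b : List String) (i : Nat) (h : i ≤ cpl a b) :
    i < cpl a b ↔ i < a.length ∧ i < b.length ∧ a.getD i "" = b.getD i "" := by
  induction a generalizing b i with
  | nil => simp [cpl, pvLcp] at h ⊢
  | cons x xs ih =>
    cases b with
    | nil => simp [cpl, pvLcp] at h ⊢
    | cons y ys =>
      by_cases hxy : x = y
      · cases i with
        | zero => simp [cpl, pvLcp, hxy]
        | succ j =>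
          have h' : j ≤ cpl xs ys := by
            simp only [cpl] at h ⊢
            simp [pvLcp, hxy] at h
            omega
          have hiff := ih ys j h'
          simp only [cpl] at hiff
          simpa [cpl, pvLcp, hxy, Nat.succ_lt_succ_iff] using hiff
      · have hc : cpl (x :: xs) (y :: ys) = 0 := by simp [cpl, pvLcp, hxy]
        have hi : i = 0 := by omega
        subst hi
        simp [hc, hxy]

lemma le_foldl_min {α : Type} (f : α → Nat) (l : List α) (m0 i : Nat) :
    i ≤ l.foldl (fun m x => min m (f x)) m0 ↔ i ≤ m0 ∧ ∀ x ∈ l, i ≤ f x := by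
  induction l generalizing m0 with
  | nil => simp
  | cons x xs ih => simp [List.foldl_cons, ih, and_assoc]

lemma foldl_min_le {α : Type} (f : α → Nat) (l : List α) (m0 : Nat) :
    l.foldl (fun m x => min m (f x)) m0 ≤ m0 :=
  ((le_foldl_min f l m0 _).mp le_rfl).1

lemma lt_foldl_min (l : List Nat) (m0 i : Nat) :
    i < l.foldl min m0 ↔ i < m0 ∧ ∀ x ∈ l, i < x := by
  induction l generalizing m0 with
  | nil => simp
  | cons x xs ih => simp [List.foldl_cons, ih, and_assoc]

lemma lt_minWords (w : List String) (t : List (List String)) (i : Nat) :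
    i < pvMinWords (w :: t) ↔ ∀ ws ∈ w :: t, i < ws.length := by
  rw [pvMinWords, List.map_cons, List.min?_cons', Option.getD_some, lt_foldl_min]
  simp

-- B's fold, started on a prefix of w0, computes a take of w0
lemma foldB (w0 : List String) (rest : List String) (m : Nat) :
    pvFold (w0.take m) rest
      = w0.take (rest.foldl (fun m n => min m (cpl w0 (PySem.Str.split₀ n))) m) := by
  induction rest generalizing m with
  | nil => simp [pvFold]
  | cons n rest ih =>
    simp only [pvFold, List.foldl_cons]
    have hp' : pvLcp (w0.take m) (PySem.Str.split₀ n)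
        = w0.take (min m (cpl w0 (PySem.Str.split₀ n))) := by
      rw [lcp_take_left, lcp_eq_take, List.take_take, Nat.min_comm]
    rw [hp']
    by_cases hz : List.take (min m (cpl w0 (PySem.Str.split₀ n))) w0 = []
    · rw [if_pos hz, hz]
      have hle := foldl_min_le (fun n => cpl w0 (PySem.Str.split₀ n)) rest
          (min m (cpl w0 (PySem.Str.split₀ n)))
      symm
      rw [List.take_eq_nil_iff]
      rcases List.take_eq_nil_iff.mp hz with h0 | h0
      · left; omega
      · right; exact h0
    · rw [if_neg hz]
      exact ih (min m (cpl w0 (PySem.Str.split₀ n)))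

-- abbreviation used only in the proofs below
def pvK (w0 : List String) (rest : List String) : Nat :=
  rest.foldl (fun m n => min m (cpl w0 (PySem.Str.split₀ n))) w0.length

-- the loop condition at index i, given agreement below i, holds exactly when i < pvK
lemma cond_iff (w0 : List String) (rest : List String) (i : Nat) (hK : i ≤ pvK w0 rest) :
    (i < pvMinWords (w0 :: rest.map PySem.Str.split₀) ∧
      ((w0 :: rest.map PySem.Str.split₀).all (fun ws => ws.getD i "" == w0.getD i "")) = true)
     ↔ i < pvK w0 rest := by
  have hKle := (le_foldl_min (fun n => cpl w0 (PySem.Str.split₀ n)) rest w0.length i).mp hK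
  constructor
  · rintro ⟨hmin, hall⟩
    have hlen := (lt_minWords w0 (rest.map PySem.Str.split₀) i).mp hmin
    rw [pvK, Nat.lt_iff_add_one_le, le_foldl_min]
    refine ⟨hlen w0 (by simp), ?_⟩
    intro n hn
    rw [Nat.add_one_le_iff, cpl_lt_iff w0 (PySem.Str.split₀ n) i (hKle.2 n hn)]
    refine ⟨hlen w0 (by simp), hlen (PySem.Str.split₀ n) (by simp; exact Or.inr ⟨n, hn, rfl⟩), ?_⟩
    rw [List.all_eq_true] at hall
    have := hall (PySem.Str.split₀ n) (by simp; exact Or.inr ⟨n, hn, rfl⟩)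
    exact ((beq_iff_eq).mp this).symm ▸ rfl
  · intro hlt
    rw [pvK, Nat.lt_iff_add_one_le, le_foldl_min] at hlt
    have hw0 : i < w0.length := hlt.1
    have hrest : ∀ n ∈ rest, i < cpl w0 (PySem.Str.split₀ n) := by
      intro n hn; have := hlt.2 n hn; omega
    constructor
    · rw [lt_minWords]
      intro ws hws
      rcases List.mem_cons.mp hws with h | h
      · exact h ▸ hw0
      · rcases List.mem_map.mp h with ⟨n, hn, rfl⟩
        exact ((cpl_lt_iff w0 _ i (hKle.2 n hn)).mp (hrest n hn)).2.1
    · rw [List.all_eq_true]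
      intro ws hws
      rcases List.mem_cons.mp hws with h | h
      · rw [h]; exact beq_self_eq_true _
      · rcases List.mem_map.mp h with ⟨n, hn, rfl⟩
        have := ((cpl_lt_iff w0 _ i (hKle.2 n hn)).mp (hrest n hn)).2.2
        exact beq_iff_eq.mpr this.symm

lemma collect_eq (w0 : List String) (rest : List String) :
    ∀ fuel i, pvMinWords (w0 :: rest.map PySem.Str.split₀) - i ≤ fuel →
      i ≤ pvK w0 rest →
      pvCollect (w0 :: rest.map PySem.Str.split₀) (pvMinWords (w0 :: rest.map PySem.Str.split₀)) i
        = (w0.drop i).take (pvK w0 rest - i) := by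
  intro fuel
  induction fuel with
  | zero =>
    intro i hfuel hK
    have hmin : ¬ i < pvMinWords (w0 :: rest.map PySem.Str.split₀) := by omega
    rw [pvCollect, dif_neg hmin]
    have : ¬ i < pvK w0 rest := fun h => hmin ((cond_iff w0 rest i hK).mpr h).1
    have hKi : pvK w0 rest - i = 0 := by omega
    rw [hKi, List.take_zero]
  | succ fuel ih =>
    intro i hfuel hK
    rw [pvCollect]
    by_cases hmin : i < pvMinWords (w0 :: rest.map PySem.Str.split₀)
    · rw [dif_pos hmin]
      simp only [List.headD_cons]
      by_cases hall : ((w0 :: rest.map PySem.Str.split₀).all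
          (fun ws => ws.getD i "" == w0.getD i "")) = true
      · rw [if_pos hall]
        have hiK : i < pvK w0 rest := (cond_iff w0 rest i hK).mp ⟨hmin, hall⟩
        have hw0 : i < w0.length := by
          exact (lt_minWords w0 (rest.map PySem.Str.split₀) i).mp hmin w0 (by simp)
        rw [ih (i + 1) (by omega) hiK]
        rw [List.getD_eq_getElem w0 "" hw0, List.drop_eq_getElem_cons hw0]
        have : pvK w0 rest - i = (pvK w0 rest - (i + 1)) + 1 := by omega
        rw [this, List.take_succ_cons]
      · rw [if_neg hall]
        have : ¬ i < pvK w0 rest := fun h => hall ((cond_iff w0 rest i hK).mpr h).2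
        have hKi : pvK w0 rest - i = 0 := by omega
        rw [hKi, List.take_zero]
    · rw [dif_neg hmin]
      have : ¬ i < pvK w0 rest := fun h => hmin ((cond_iff w0 rest i hK).mpr h).1
      have hKi : pvK w0 rest - i = 0 := by omega
      rw [hKi, List.take_zero]

lemma pvFold_nil (rest : List String) : pvFold [] rest = [] := by
  cases rest <;> simp [pvFold, pvLcp]

-- ===== VERDICT (by name: the statement is the Claim_ definition above) =====
theorem find_common_words_spec : Claim_equal_find_common_words := by
  unfold Claim_equal_find_common_words
  intro names _
  unfold Spec_find_common_words
  cases names with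
  | nil => rfl
  | cons n rest =>
    rw [find_common_words, find_common_words_alt, if_neg (List.cons_ne_nil n rest)]
    simp only [List.map_cons, List.headD_cons]
    by_cases hw0 : PySem.Str.split₀ n = []
    · rw [if_pos (Or.inr hw0), hw0, pvFold_nil]
      rfl
    · rw [if_neg (by simp [hw0])]
      have hB : pvFold (PySem.Str.split₀ n) rest
          = (PySem.Str.split₀ n).take (pvK (PySem.Str.split₀ n) rest) := by
        have := foldB (PySem.Str.split₀ n) rest (PySem.Str.split₀ n).length
        rw [List.take_length] at this
        exact this
      have hA := collect_eq (PySem.Str.split₀ n) rest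
          (pvMinWords (PySem.Str.split₀ n :: rest.map PySem.Str.split₀)) 0 (by omega) (by omega)
      simp only [List.drop_zero, Nat.sub_zero] at hA
      rw [hA, hB]
      by_cases hc : (PySem.Str.split₀ n).take (pvK (PySem.Str.split₀ n) rest) = []
      · rw [if_neg (by simp [hc]), hc]
        rfl
      · rw [if_pos hc]
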